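-- pv_equiv track=rewrite | github.com/MahAbram/script | batch_pdf2xml_conversion.py | get_state_code_from_postcode
-- ===== SOURCE A (Python) =====
-- STATE_MAP = {
--     range(79, 87): "1",   # Johor
--     range(2, 10):  "2",   # Kedah
--     range(15, 19): "3",   # Kelantan
--     range(75, 79): "4",   # Melaka
--     range(70, 74): "5",   # Negeri Sembilan
--     range(25, 29): "6",   # Pahang
--     range(39, 40): "6",
--     range(69, 70): "6",
--     range(30, 37): "7",   # Perak
--     range(1, 2):   "8",   # Perlis
--     range(10, 15): "9",   # Pulau Pinang
--     range(88, 92): "10",  # Sabah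
--     range(93, 99): "11",  # Sarawak
--     range(40, 50): "12",  # Selangor
--     range(63, 69): "12",
--     range(20, 25): "13",  # Terengganu
--     range(50, 61): "14",  # W.P. Kuala Lumpur
--     range(87, 88): "15",  # W.P. Labuan
--     range(62, 63): "16",  # W.P. Putrajaya
-- }
--
-- def get_state_code_from_postcode(postcode):
--     try:
--         prefix = int(postcode[:2])
--         for num_range, state_code in STATE_MAP.items():
--             if prefix in num_range:
--                 return state_code
--     except:
--         pass
--     return ""
-- ===== SOURCE B (Python) =====
-- # B replaces A's per-call scan over ~20 ranges with a single indexed lookup in a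
-- # literal 100-entry prefix->state table (entry i = state code for prefix i, "" if none).
-- PREFIX_TO_STATE = (
--     "", "8", "2", "2", "2", "2", "2", "2", "2", "2",
--     "9", "9", "9", "9", "9", "3", "3", "3", "3", "",
--     "13", "13", "13", "13", "13", "6", "6", "6", "6", "",
--     "7", "7", "7", "7", "7", "7", "7", "", "", "6",
--     "12", "12", "12", "12", "12", "12", "12", "12", "12", "12",
--     "14", "14", "14", "14", "14", "14", "14", "14", "14", "14",
--     "14", "", "16", "12", "12", "12", "12", "12", "12", "6",
--     "5", "5", "5", "5", "", "4", "4", "4", "4", "1",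
--     "1", "1", "1", "1", "1", "1", "1", "15", "10", "10",
--     "10", "10", "", "11", "11", "11", "11", "11", "11", "",
-- )
--
-- def get_state_code_from_postcode(postcode):
--     try:
--         prefix = int(postcode[:2])
--         if 0 <= prefix < 100:
--             return PREFIX_TO_STATE[prefix]
--     except:
--         pass
--     return ""
-- ===== Notes on version B (the rewrite author's own statement) =====
-- stated objective: alternative
-- what changed: B answers each call with a single bounds-checked indexed lookup in a literal 100-entry prefix-to-state table, eliminating A's per-call linear scan over the 19 ranges (B contains no ranges at all).
import Mathlib
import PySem

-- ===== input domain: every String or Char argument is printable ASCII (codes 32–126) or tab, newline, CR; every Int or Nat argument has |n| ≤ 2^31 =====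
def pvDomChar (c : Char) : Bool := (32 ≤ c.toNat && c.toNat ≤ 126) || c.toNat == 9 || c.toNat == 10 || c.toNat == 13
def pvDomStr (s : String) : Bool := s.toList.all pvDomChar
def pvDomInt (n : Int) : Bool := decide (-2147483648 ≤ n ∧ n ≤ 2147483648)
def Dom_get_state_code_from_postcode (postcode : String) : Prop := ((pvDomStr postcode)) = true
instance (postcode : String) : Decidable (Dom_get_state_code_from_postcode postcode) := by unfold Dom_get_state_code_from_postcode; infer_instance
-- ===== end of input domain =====

-- B answers with one indexed lookup in a literal 100-entry prefix->state table instead of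
-- A's per-call scan over the 19 ranges; same return value for every string input.


-- ===== PORT A =====
-- STATE_MAP as an (ordered) list of ((start, stop), code); 'prefix in range(a,b)' is a ≤ prefix < b
def pvStateMap : List ((Int × Int) × String) :=
  [((79, 87), "1"), ((2, 10), "2"), ((15, 19), "3"), ((75, 79), "4"),
   ((70, 74), "5"), ((25, 29), "6"), ((39, 40), "6"), ((69, 70), "6"),
   ((30, 37), "7"), ((1, 2), "8"), ((10, 15), "9"), ((88, 92), "10"),
   ((93, 99), "11"), ((40, 50), "12"), ((63, 69), "12"), ((20, 25), "13"),
   ((50, 61), "14"), ((87, 88), "15"), ((62, 63), "16")]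

-- A's for-loop over STATE_MAP.items(): return the first code whose range contains prefix, else ""
def pvScanA : List ((Int × Int) × String) → Int → String
  | [], _ => ""
  | ((a, b), code) :: rest, p => if a ≤ p ∧ p < b then code else pvScanA rest p

def get_state_code_from_postcode (postcode : String) : String :=
  match PySem.Int.ofChars? (PySem.Chars.slice postcode.toList none (some 2)) with
  | none => ""            -- int() raised; 'except: pass' then 'return ""'
  | some p => pvScanA pvStateMap p

-- ===== PORT B =====
-- PREFIX_TO_STATE: the literal 100-entry tuple from Source B
def pvPrefixToState : List String :=
  ["", "8", "2", "2", "2", "2", "2", "2", "2", "2",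
   "9", "9", "9", "9", "9", "3", "3", "3", "3", "",
   "13", "13", "13", "13", "13", "6", "6", "6", "6", "",
   "7", "7", "7", "7", "7", "7", "7", "", "", "6",
   "12", "12", "12", "12", "12", "12", "12", "12", "12", "12",
   "14", "14", "14", "14", "14", "14", "14", "14", "14", "14",
   "14", "", "16", "12", "12", "12", "12", "12", "12", "6",
   "5", "5", "5", "5", "", "4", "4", "4", "4", "1",
   "1", "1", "1", "1", "1", "1", "1", "15", "10", "10",
   "10", "10", "", "11", "11", "11", "11", "11", "11", ""]

def get_state_code_from_postcode_alt (postcode : String) : String :=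
  match PySem.Int.ofChars? (PySem.Chars.slice postcode.toList none (some 2)) with
  | none => ""
  | some p => if 0 ≤ p ∧ p < 100 then pvPrefixToState[p.toNat]! else ""

-- ===== PRECONDITION & SPEC =====
def Spec_get_state_code_from_postcode (postcode : String) (out : String) : Prop := out = get_state_code_from_postcode_alt postcode
instance (postcode : String) (out : String) : Decidable (Spec_get_state_code_from_postcode postcode out) := by unfold Spec_get_state_code_from_postcode; infer_instance

-- ===== CLAIM =====
def Claim_equal_get_state_code_from_postcode : Prop := ∀ (postcode : String), Dom_get_state_code_from_postcode postcode → Spec_get_state_code_from_postcode postcode (get_state_code_from_postcode postcode)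

-- ===== LEMMAS AND PROOFS =====

-- the scan and the table agree on every prefix in 0..99
set_option maxRecDepth 20000 in
set_option maxHeartbeats 2000000 in
theorem pv_table_small : ∀ n ∈ List.range 100,
    pvScanA pvStateMap (n : Int) = pvPrefixToState[n]! := by decide

-- when every range lies within [0,100), a prefix outside [0,100) matches none of them
theorem pv_scan_out_gen (l : List ((Int × Int) × String)) (p : Int)
    (hb : ∀ x ∈ l, 0 ≤ x.1.1 ∧ x.1.2 ≤ 100) (hp : ¬ (0 ≤ p ∧ p < 100)) :
    pvScanA l p = "" := by
  induction l with
  | nil => rfl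
  | cons x rest ih =>
    obtain ⟨⟨a, b⟩, code⟩ := x
    have hx := hb _ (List.mem_cons_self ..)
    rw [pvScanA, if_neg (by simp at hx; omega)]
    exact ih fun y hy => hb y (List.mem_cons_of_mem _ hy)

theorem pv_key (p : Int) :
    pvScanA pvStateMap p = (if 0 ≤ p ∧ p < 100 then pvPrefixToState[p.toNat]! else "") := by
  by_cases h : 0 ≤ p ∧ p < 100
  · rw [if_pos h]
    have hn : p = ((p.toNat : Nat) : Int) := by omega
    rw [hn]
    exact pv_table_small p.toNat (List.mem_range.mpr (by omega))
  · rw [if_neg h]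
    exact pv_scan_out_gen _ p (by decide) h

-- ===== VERDICT =====
theorem get_state_code_from_postcode_spec : Claim_equal_get_state_code_from_postcode := by
  intro postcode _
  unfold Spec_get_state_code_from_postcode get_state_code_from_postcode get_state_code_from_postcode_alt
  cases PySem.Int.ofChars? (PySem.Chars.slice postcode.toList none (some 2)) with
  | none => rfl
  | some p => exact pv_key p
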